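-- pv_equiv track=rewrite | github.com/quern-dev/quern | server/__main__.py | _toml_upsert_section
-- ===== SOURCE A (Python) =====
-- def _toml_upsert_section(text: str, section: str, fields: dict) -> str:
--     """Insert or replace a TOML section using text manipulation.
--
--     If the section header exists, replaces content from that line until
--     the next section header (or EOF). If not found, appends at end.
--     """
--     header = f"[{section}]"
--     lines = text.splitlines(keepends=True)
--
--     # Build replacement block
--     field_lines = [f"{k} = {v}\n" for k, v in fields.items()]
--     block = [header + "\n"] + field_lines
--
--     # Find the section
--     start = None
--     for i, line in enumerate(lines):
--         if line.strip() == header: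
--             start = i
--             break
--
--     if start is None:
--         # Append — ensure there's a blank line separator
--         if lines and not lines[-1].endswith("\n"):
--             lines.append("\n")
--         if lines and lines[-1].strip():
--             lines.append("\n")
--         lines.extend(block)
--         return "".join(lines)
--
--     # Find end of existing section (next header or EOF)
--     end = len(lines)
--     for i in range(start + 1, len(lines)):
--         stripped = lines[i].strip()
--         if stripped.startswith("[") and not stripped.startswith("[["):
--             end = i
--             break
--
--     lines[start:end] = block + ["\n"]
--     return "".join(lines)
-- ===== SOURCE B (Python) =====
-- def _toml_upsert_section(text: str, section: str, fields: dict) -> str: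
--     """Single streaming pass: copy lines, splice the replacement block in
--     at the first matching header (skipping the old section), or append."""
--     header = f"[{section}]"
--     block = [header + "\n"] + [f"{k} = {v}\n" for k, v in fields.items()]
--     lines = text.splitlines(keepends=True)
--     out = []
--     found = False
--     i = 0
--     n = len(lines)
--     while i < n:
--         line = lines[i]
--         i += 1
--         if not found and line.strip() == header:
--             found = True
--             out.extend(block)
--             out.append("\n")
--             while i < n:
--                 s = lines[i].strip()
--                 if s.startswith("[") and not s.startswith("[["):
--                     break
--                 i += 1
--         else:
--             out.append(line)
--     if found:
--         return "".join(out)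
--     if out and not out[-1].endswith("\n"):
--         out.append("\n")
--     if out and out[-1].strip():
--         out.append("\n")
--     out.extend(block)
--     return "".join(out)
-- ===== Notes on version B (the rewrite author's own statement) =====
-- stated objective: alternative
-- what changed: Replaces A's three separate phases (index search for start, second index scan for end, slice assignment lines[start:end]=block) by a single streaming pass that copies lines into an output list, splicing the block in at the first matching header and skipping the old section inline, with a found flag driving the append branch.
import Mathlib
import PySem

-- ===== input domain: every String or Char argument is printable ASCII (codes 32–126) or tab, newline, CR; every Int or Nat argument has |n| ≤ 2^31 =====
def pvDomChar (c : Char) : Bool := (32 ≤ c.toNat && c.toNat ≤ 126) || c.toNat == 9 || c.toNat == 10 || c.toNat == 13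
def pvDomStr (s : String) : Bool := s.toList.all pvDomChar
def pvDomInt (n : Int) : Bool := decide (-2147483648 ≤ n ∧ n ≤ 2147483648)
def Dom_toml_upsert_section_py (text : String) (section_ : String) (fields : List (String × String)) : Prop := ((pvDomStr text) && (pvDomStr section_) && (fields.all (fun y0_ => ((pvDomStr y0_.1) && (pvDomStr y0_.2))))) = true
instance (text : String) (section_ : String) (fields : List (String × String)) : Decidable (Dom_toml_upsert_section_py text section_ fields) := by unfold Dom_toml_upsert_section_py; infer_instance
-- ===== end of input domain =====

-- B replaces A's index-search + slice-assignment by one streaming pass splicing the block in place (objective: alternative, same cost).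

-- ===== PORT A =====
-- shared model of Python's text.splitlines(keepends=True); exact on the Dom alphabet
-- (the only line boundaries among printable ASCII + tab/newline/CR are '\n', '\r', '\r\n')
def pvSplitKeep : List Char → List (List Char)
  | [] => []
  | '\r' :: '\n' :: rest => ['\r', '\n'] :: pvSplitKeep rest
  | '\r' :: rest => ['\r'] :: pvSplitKeep rest
  | '\n' :: rest => ['\n'] :: pvSplitKeep rest
  | c :: rest =>
      match pvSplitKeep rest with
      | [] => [[c]]
      | l :: ls => (c :: l) :: ls

-- shared: header = f"[{section}]" and block = [header+"\n"] + [f"{k} = {v}\n" for k, v in fields.items()]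
def pvHeader (section_ : String) : List Char := '[' :: section_.toList ++ [']']
def pvBlock (section_ : String) (fields : List (String × String)) : List (List Char) :=
  (pvHeader section_ ++ ['\n']) ::
    fields.map (fun kv => kv.1.toList ++ [' ', '=', ' '] ++ kv.2.toList ++ ['\n'])

-- shared: the next-section test 'stripped.startswith("[") and not stripped.startswith("[[")'
def pvIsHdrLine (l : List Char) : Bool :=
  let s := PySem.Chars.strip l
  PySem.Chars.startswith s ['['] && !PySem.Chars.startswith s ['[', '[']

-- A's first loop: index of the first line whose strip() equals the header
def pvFindStart (header : List Char) : List (List Char) → Option Nat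
  | [] => none
  | l :: rest =>
      if PySem.Chars.strip l = header then some 0
      else (pvFindStart header rest).map (· + 1)

-- A's second loop over range(start+1, len(lines)), transcribed on the suffix lines[start+1:]
def pvFindEnd : List (List Char) → Option Nat
  | [] => none
  | l :: rest => if pvIsHdrLine l then some 0 else (pvFindEnd rest).map (· + 1)

def toml_upsert_section_py (text : String) (section_ : String) (fields : List (String × String)) : String :=
  let header := pvHeader section_
  let lines := pvSplitKeep text.toList
  let block := pvBlock section_ fields
  match pvFindStart header lines with
  | none =>
      -- append branch
      let lines1 :=
        match lines.getLast? with
        | some last => if PySem.Chars.endswith last ['\n'] then lines else lines ++ [['\n']]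
        | none => lines
      let lines2 :=
        match lines1.getLast? with
        | some last => if PySem.Chars.strip last ≠ [] then lines1 ++ [['\n']] else lines1
        | none => lines1
      String.ofList ((lines2 ++ block).flatten)
  | some s =>
      let e :=
        match pvFindEnd (lines.drop (s + 1)) with
        | some k => s + 1 + k
        | none => lines.length
      String.ofList ((lines.take s ++ block ++ [['\n']] ++ lines.drop e).flatten)

-- ===== PORT B =====
-- B's inner skip loop: drop lines until the next section header (kept)
def pvSkip : List (List Char) → List (List Char)
  | [] => []
  | l :: rest => if pvIsHdrLine l then l :: rest else pvSkip rest

-- B's single streaming pass: output lines plus the 'found' flag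
def pvGo (header : List Char) (block : List (List Char)) : List (List Char) → List (List Char) × Bool
  | [] => ([], false)
  | l :: rest =>
      if PySem.Chars.strip l = header then
        (block ++ [['\n']] ++ pvSkip rest, true)
      else
        let r := pvGo header block rest
        (l :: r.1, r.2)

def toml_upsert_section_py_alt (text : String) (section_ : String) (fields : List (String × String)) : String :=
  let header := pvHeader section_
  let block := pvBlock section_ fields
  let r := pvGo header block (pvSplitKeep text.toList)
  if r.2 then String.ofList r.1.flatten
  else
    let out1 :=
      match r.1.getLast? with
      | some last => if PySem.Chars.endswith last ['\n'] then r.1 else r.1 ++ [['\n']]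
      | none => r.1
    let out2 :=
      match out1.getLast? with
      | some last => if PySem.Chars.strip last ≠ [] then out1 ++ [['\n']] else out1
      | none => out1
    String.ofList ((out2 ++ block).flatten)

-- ===== PRECONDITION & SPEC =====
def Spec_toml_upsert_section_py (text : String) (section_ : String) (fields : List (String × String)) (out : String) : Prop := out = toml_upsert_section_py_alt text section_ fields
instance (text : String) (section_ : String) (fields : List (String × String)) (out : String) : Decidable (Spec_toml_upsert_section_py text section_ fields out) := by unfold Spec_toml_upsert_section_py; infer_instance

-- ===== CLAIM (what is proved, stated in full; the proofs are below) =====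
def Claim_equal_toml_upsert_section_py : Prop := ∀ (text : String) (section_ : String) (fields : List (String × String)), Dom_toml_upsert_section_py text section_ fields → Spec_toml_upsert_section_py text section_ fields (toml_upsert_section_py text section_ fields)

-- ===== LEMMAS AND PROOFS =====

-- B's skip loop lands exactly where A's end-index scan points
theorem pvSkip_eq_drop (t : List (List Char)) :
    pvSkip t = t.drop ((pvFindEnd t).getD t.length) := by
  induction t with
  | nil => rfl
  | cons l rest ih =>
      by_cases h : pvIsHdrLine l = true
      · simp [pvSkip, pvFindEnd, h]
      · simp only [pvSkip, pvFindEnd, h, if_neg, Bool.not_eq_true] at *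
        cases hfe : pvFindEnd rest with
        | none => simp [hfe] at ih ⊢; simpa [hfe] using ih
        | some k => simp [hfe] at ih ⊢; simpa [hfe] using ih

-- when no line matches the header, the streaming pass copies the input unchanged
theorem pvGo_none (header : List Char) (block : List (List Char)) (lines : List (List Char))
    (h : pvFindStart header lines = none) :
    pvGo header block lines = (lines, false) := by
  induction lines with
  | nil => rfl
  | cons l rest ih =>
      by_cases hm : PySem.Chars.strip l = header
      · simp [pvFindStart, hm] at h
      · simp [pvFindStart, hm] at h
        simp [pvGo, hm, ih h]

-- when the header first matches at index s, the streaming pass produces A's spliced list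
theorem pvGo_some (header : List Char) (block : List (List Char)) :
    ∀ (lines : List (List Char)) (s : Nat), pvFindStart header lines = some s →
    pvGo header block lines =
      (lines.take s ++ block ++ [['\n']] ++ pvSkip (lines.drop (s + 1)), true) := by
  intro lines
  induction lines with
  | nil => intro s h; simp [pvFindStart] at h
  | cons l rest ih =>
      intro s h
      by_cases hm : PySem.Chars.strip l = header
      · simp [pvFindStart, hm] at h
        subst h
        simp [pvGo, hm]
      · simp [pvFindStart, hm] at h
        obtain ⟨s', hs', rfl⟩ := h
        simp [pvGo, hm, ih s' hs']

-- ===== VERDICT (by name: the statement is the Claim_ definition above) =====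
theorem toml_upsert_section_py_spec : Claim_equal_toml_upsert_section_py := by
  intro text section_ fields _
  unfold Spec_toml_upsert_section_py toml_upsert_section_py toml_upsert_section_py_alt
  cases hfs : pvFindStart (pvHeader section_) (pvSplitKeep text.toList) with
  | none =>
      simp only [hfs, pvGo_none (pvHeader section_) (pvBlock section_ fields) _ hfs]
      simp
  | some s =>
      simp only [hfs, pvGo_some (pvHeader section_) (pvBlock section_ fields) _ s hfs,
        pvSkip_eq_drop]
      cases hfe : pvFindEnd ((pvSplitKeep text.toList).drop (s + 1)) with
      | none =>
          have hd1 : List.drop (s + 1 + ((pvSplitKeep text.toList).length - (s + 1)))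
              (pvSplitKeep text.toList) = [] := List.drop_eq_nil_of_le (by omega)
          have hd2 : List.drop (pvSplitKeep text.toList).length (pvSplitKeep text.toList) = [] :=
            List.drop_eq_nil_of_le le_rfl
          simp [List.drop_drop, hd1, hd2]
      | some k =>
          simp [List.drop_drop]
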